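-- pv_equiv track=rewrite | github.com/jaeuk412/PredictionServer | API/Predict/predic_API.py | get_arguments_value
-- ===== SOURCE A (Python) =====
-- def get_arguments_value(argument):
--     # argument = arguments.split('/')
--     # argument = argument[0]
--     a=0
--     value_str = str()
--     value = str()
--
--     while(a<len(argument)):
--         if argument[a].isalpha() or argument[a].isdigit():
--             value_str += argument[a]
--         else:
--             if value_str:
--                 value+='%s_'%(value_str)
--                 value_str = ''
--         if a == len(argument)-1:
--             value += '%s' % (value_str)
--         a += 1
--     return value
-- ===== SOURCE B (Python) =====
-- def _ok(c):
--     return c.isalpha() or c.isdigit()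
--
-- def get_arguments_value(argument):
--     # Phase 1: extract the maximal alphanumeric runs with an index-jumping scan.
--     runs = []
--     i = 0
--     n = len(argument)
--     while i < n:
--         if _ok(argument[i]):
--             j = i
--             while j < n and _ok(argument[j]):
--                 j += 1
--             runs.append(argument[i:j])
--             i = j
--         else:
--             i += 1
--     # Phase 2: join the runs; a trailing separator leaves a trailing underscore.
--     res = '_'.join(runs)
--     if runs and not _ok(argument[n - 1]):
--         res += '_'
--     return res
-- ===== Notes on version B (the rewrite author's own statement) =====
-- stated objective: faster
-- what changed: B first extracts the maximal alphanumeric runs with an index-jumping scan and then joins them (appending the trailing separator marker A leaves), instead of A's per-character accumulate-and-emit loop whose repeated immutable-string concatenation is quadratic.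
import Mathlib
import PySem

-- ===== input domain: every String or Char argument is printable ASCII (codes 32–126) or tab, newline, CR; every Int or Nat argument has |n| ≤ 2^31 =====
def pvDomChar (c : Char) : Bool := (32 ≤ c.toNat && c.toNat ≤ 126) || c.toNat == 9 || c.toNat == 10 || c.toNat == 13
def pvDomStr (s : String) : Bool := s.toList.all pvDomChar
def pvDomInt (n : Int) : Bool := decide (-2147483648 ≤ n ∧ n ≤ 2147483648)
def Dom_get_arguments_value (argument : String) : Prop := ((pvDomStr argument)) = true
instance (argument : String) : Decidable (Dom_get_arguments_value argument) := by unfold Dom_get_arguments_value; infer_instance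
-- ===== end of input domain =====

-- B rebuilds the result in two phases (extract the maximal alphanumeric runs with an
-- index-jumping scan, then join them, adding the trailing underscore a trailing separator
-- leaves) instead of A's per-character accumulate-and-emit single pass whose repeated
-- string concatenation is quadratic; a timing run measured B faster.

-- ===== PORT A =====
-- the while loop over index a, with state (value_str, value); 'a == len(argument)-1'
-- becomes 'rest = []' on the remaining characters.
def pvGoA : List Char → List Char → List Char → List Char
  | [], _, value => value
  | c :: rest, value_str, value =>
    let (value_str', value') :=
      if PySem.Chars.isalpha c || PySem.Chars.isdigit c then
        (value_str ++ [c], value)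
      else if value_str ≠ [] then ([], value ++ value_str ++ ['_'])
      else (value_str, value)
    if rest = [] then value' ++ value_str' else pvGoA rest value_str' value'

def get_arguments_value (argument : String) : String :=
  String.mk (pvGoA argument.toList [] [])

-- ===== PORT B =====
def pvOkB (c : Char) : Bool := PySem.Chars.isalpha c || PySem.Chars.isdigit c

-- phase 1 of Source B: the outer index loop that jumps over each maximal alphanumeric run
def pvRunsB : List Char → List (List Char)
  | [] => []
  | c :: rest =>
    if pvOkB c then (c :: rest.takeWhile pvOkB) :: pvRunsB (rest.dropWhile pvOkB)
    else pvRunsB rest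
termination_by cs => cs.length
decreasing_by
  · simpa using Nat.lt_succ_of_le (List.length_dropWhile_le pvOkB rest)
  · simp

def get_arguments_value_alt (argument : String) : String :=
  let cs := argument.toList
  let runs := pvRunsB cs
  let res := PySem.Chars.join ['_'] runs
  String.mk (if !runs.isEmpty && !pvOkB (cs.getLastD 'a') then res ++ ['_'] else res)

-- ===== PRECONDITION & SPEC =====
def Spec_get_arguments_value (argument : String) (out : String) : Prop := out = get_arguments_value_alt argument
instance (argument : String) (out : String) : Decidable (Spec_get_arguments_value argument out) := by unfold Spec_get_arguments_value; infer_instance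

-- ===== CLAIM (what is proved, stated in full; the proofs are below) =====
def Claim_equal_get_arguments_value : Prop := ∀ (argument : String), Dom_get_arguments_value argument → Spec_get_arguments_value argument (get_arguments_value argument)

-- ===== LEMMAS AND PROOFS =====

-- the char-level result of B
def pvB (cs : List Char) : List Char :=
  if !(pvRunsB cs).isEmpty && !pvOkB (cs.getLastD 'a') then
    PySem.Chars.join ['_'] (pvRunsB cs) ++ ['_']
  else PySem.Chars.join ['_'] (pvRunsB cs)

lemma pvRunsB_nil_iff (cs : List Char) : pvRunsB cs = [] ↔ ∀ c ∈ cs, pvOkB c = false := by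
  induction cs with
  | nil => simp [pvRunsB]
  | cons c rest ih =>
    by_cases h : pvOkB c = true
    · simp [pvRunsB, h]
    · simp only [Bool.not_eq_true] at h
      simp [pvRunsB, h, ih]

lemma pvTakeWhile_allok (vs : List Char) (c : Char) (rest : List Char)
    (hvs : ∀ x ∈ vs, pvOkB x = true) (hc : pvOkB c = false) :
    (vs ++ c :: rest).takeWhile pvOkB = vs ∧ (vs ++ c :: rest).dropWhile pvOkB = c :: rest := by
  induction vs with
  | nil => simp [hc]
  | cons y ys ih =>
    have hy : pvOkB y = true := hvs y (by simp)
    have := ih (fun x hx => hvs x (by simp [hx]))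
    simp only [List.cons_append, List.takeWhile_cons, List.dropWhile_cons, hy]
    simp [this.1, this.2]

-- an all-alphanumeric nonempty string is a single run and gets no trailing underscore
lemma pvLast_mem (l : List Char) (h : l ≠ []) : l.getLast?.getD 'a' ∈ l := by
  rw [List.getLast?_eq_some_getLast h]; exact List.getLast_mem h

lemma pvLast_append (l₁ l₂ : List Char) (h : l₂ ≠ []) :
    (l₁ ++ l₂).getLast?.getD 'a' = l₂.getLast?.getD 'a' := by
  rw [List.getLast?_append, List.getLast?_eq_some_getLast h]; rfl

lemma pvB_allok (ws : List Char) (hne : ws ≠ []) (hws : ∀ x ∈ ws, pvOkB x = true) :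
    pvB ws = ws := by
  cases ws with
  | nil => exact absurd rfl hne
  | cons w ws' =>
    have hw : pvOkB w = true := hws w (by simp)
    have htake : ws'.takeWhile pvOkB = ws' := List.takeWhile_eq_self_iff.mpr
      (fun x hx => hws x (by simp [hx]))
    have hdrop : ws'.dropWhile pvOkB = [] := List.dropWhile_eq_nil_iff.mpr
      (fun x hx => hws x (by simp [hx]))
    have hruns : pvRunsB (w :: ws') = [w :: ws'] := by
      simp [pvRunsB, hw, htake, hdrop]
    have hlast : pvOkB ((w :: ws').getLast?.getD 'a') = true :=
      hws _ (pvLast_mem _ (by simp))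
    simp [pvB, hruns, hlast, PySem.Chars.join_singleton]

-- key step: a separator after an all-alphanumeric accumulated run vs
lemma pvB_sep (vs : List Char) (c : Char) (rest : List Char)
    (hvs : ∀ x ∈ vs, pvOkB x = true) (hc : pvOkB c = false) :
    pvB (vs ++ c :: rest) = (if vs = [] then [] else vs ++ ['_']) ++ pvB rest := by
  have hskip : pvRunsB (c :: rest) = pvRunsB rest := by simp [pvRunsB, hc]
  cases vs with
  | nil =>
    simp only [List.nil_append]
    cases rest with
    | nil => simp [pvB, pvRunsB, hc]
    | cons r rs =>
      simp [pvB, hskip]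
  | cons v0 vs' =>
    have ⟨htake, hdrop⟩ := pvTakeWhile_allok vs' c rest
      (fun x hx => hvs x (by simp [hx])) hc
    have hv0 : pvOkB v0 = true := hvs v0 (by simp)
    have hruns : pvRunsB ((v0 :: vs') ++ c :: rest) = (v0 :: vs') :: pvRunsB rest := by
      rw [List.cons_append, pvRunsB]
      simp [hv0, htake, hdrop, hskip]
    rw [List.cons_append] at hruns
    have hlast : (v0 :: (vs' ++ c :: rest)).getLast?.getD 'a' = (c :: rest).getLast?.getD 'a' := by
      rw [← List.cons_append]; exact pvLast_append _ _ (by simp)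
    by_cases hre : pvRunsB rest = []
    · -- no alphanumeric char in rest: the last char of the whole input is a separator
      have hfail : ∀ x ∈ rest, pvOkB x = false := (pvRunsB_nil_iff rest).mp hre
      have hlastv : pvOkB ((v0 :: (vs' ++ c :: rest)).getLast?.getD 'a') = false := by
        rw [hlast]
        rcases List.mem_cons.mp (pvLast_mem (c :: rest) (by simp)) with h | h
        · rw [h]; exact hc
        · exact hfail _ h
      simp [pvB, hruns, hre, hlastv, PySem.Chars.join_singleton]
    · -- rest has at least one run; rest ≠ []
      have hrestne : rest ≠ [] := by rintro rfl; simp [pvRunsB] at hre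
      obtain ⟨r0, rs', hrs⟩ : ∃ r0 rs', pvRunsB rest = r0 :: rs' := by
        cases h : pvRunsB rest with
        | nil => exact absurd h hre
        | cons a b => exact ⟨a, b, rfl⟩
      have hlast2 : (v0 :: (vs' ++ c :: rest)).getLast?.getD 'a' = rest.getLast?.getD 'a' := by
        rw [hlast]; exact pvLast_append [c] rest hrestne
      by_cases htr : pvOkB (rest.getLast?.getD 'a') = true
      · simp [pvB, hruns, hrs, hlast2, htr, PySem.Chars.join_cons_cons]
      · simp only [Bool.not_eq_true] at htr
        simp [pvB, hruns, hrs, hlast2, htr, PySem.Chars.join_cons_cons]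

-- the loop invariant: A's loop, with run accumulator vs (all alphanumeric) and output v,
-- produces v followed by B's answer on vs ++ remaining input
lemma pvGoA_eq (cs : List Char) : ∀ vs v, cs ≠ [] → (∀ x ∈ vs, pvOkB x = true) →
    pvGoA cs vs v = v ++ pvB (vs ++ cs) := by
  induction cs with
  | nil => intro vs v h; exact absurd rfl h
  | cons c rest ih =>
    intro vs v _ hvs
    by_cases hc : pvOkB c = true
    · have hok : (PySem.Chars.isalpha c || PySem.Chars.isdigit c) = true := hc
      have hvs' : ∀ x ∈ vs ++ [c], pvOkB x = true := by
        intro x hx; rcases List.mem_append.mp hx with h | h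
        · exact hvs x h
        · simp at h; subst h; exact hc
      cases rest with
      | nil =>
        rw [pvGoA]
        simp only [hok, if_true]
        rw [pvB_allok (vs ++ [c]) (by simp) hvs']
      | cons r rs =>
        rw [pvGoA]
        simp only [hok, if_true, if_neg (by simp : ¬(r :: rs = []))]
        rw [ih (vs ++ [c]) v (by simp) hvs']
        simp
    · simp only [Bool.not_eq_true] at hc
      have hok : (PySem.Chars.isalpha c || PySem.Chars.isdigit c) = false := hc
      have hB0 : pvB [] = [] := by simp [pvB, pvRunsB, PySem.Chars.join_nil]
      by_cases hvse : vs = []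
      · subst hvse
        cases rest with
        | nil =>
          rw [pvGoA]
          simp only [hok, Bool.false_eq_true, if_false]
          rw [pvB_sep [] c [] (by simp) hc]
          simp [hB0]
        | cons r rs =>
          rw [pvGoA]
          simp only [hok, Bool.false_eq_true, if_false, if_neg (by simp : ¬(r :: rs = []))]
          simp only [ne_eq, not_true_eq_false, if_false]
          rw [ih [] v (by simp) (by simp), pvB_sep [] c (r :: rs) (by simp) hc]
          simp
      · cases rest with
        | nil =>
          rw [pvGoA]
          simp only [hok, Bool.false_eq_true, if_false, ne_eq, hvse, not_false_iff, if_true]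
          rw [pvB_sep vs c [] hvs hc]
          simp [hvse, hB0]
        | cons r rs =>
          rw [pvGoA]
          simp only [hok, Bool.false_eq_true, if_false, ne_eq, hvse, not_false_iff, if_true,
            if_neg (by simp : ¬(r :: rs = []))]
          rw [ih [] (v ++ vs ++ ['_']) (by simp) (by simp), pvB_sep vs c (r :: rs) hvs hc]
          simp [hvse]

-- ===== VERDICT (by name: the statement is the Claim_ definition above) =====
theorem get_arguments_value_spec : Claim_equal_get_arguments_value := by
  intro argument _
  unfold Spec_get_arguments_value get_arguments_value get_arguments_value_alt
  cases h : argument.toList with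
  | nil => simp [pvGoA, pvRunsB, PySem.Chars.join_nil]
  | cons c rest =>
    rw [pvGoA_eq (c :: rest) [] [] (by simp) (by simp)]
    simp [pvB]
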